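-- pv_equiv track=rewrite | github.com/BRCAChallenge/brca-exchange | pipeline/clinvar/concordance/string_comp_pipeline/transpose_variant.py | decide_concordance
-- ===== SOURCE A (Python) =====
-- def decide_concordance(patho_set):
--     if len(patho_set) == 1:
--         return True
--     else:
--         concordant = True
--         patho_list = list(patho_set)
--         while len(patho_list) > 0:
--             first_item = patho_list.pop(0)
--             for each_of_rest in patho_list:
--                 if is_discordant(first_item, each_of_rest):
--                     concordant = False
--         return concordant
--
-- def is_discordant(term1, term2):
--     """assess concordinance based on invitae poster criteria"""
--     if "PATHO" in (term1.upper() + term2.upper()):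
--         if ("PATHO" in term1.upper()) and ("PATHO" in term2.upper()):
--             return False
--         else:
--             return True
--     else:
--         return False
-- ===== SOURCE B (Python) =====
-- def decide_concordance(patho_set):
--     terms = list(patho_set)
--     n_patho = sum(1 for t in terms if "PATHO" in t.upper())
--     return n_patho == 0 or n_patho == len(terms)
-- ===== Notes on version B (the rewrite author's own statement) =====
-- stated objective: faster
-- what changed: Replaced the O(n^2) pairwise pop-and-compare loop by a single pass counting the terms whose uppercase form contains 'PATHO'; the set is concordant iff that count is 0 or n.
-- outside the precondition, e.g. on decide_concordance({'hopat', 'HOPAT'}): A returns False, B returns True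
import Mathlib
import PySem

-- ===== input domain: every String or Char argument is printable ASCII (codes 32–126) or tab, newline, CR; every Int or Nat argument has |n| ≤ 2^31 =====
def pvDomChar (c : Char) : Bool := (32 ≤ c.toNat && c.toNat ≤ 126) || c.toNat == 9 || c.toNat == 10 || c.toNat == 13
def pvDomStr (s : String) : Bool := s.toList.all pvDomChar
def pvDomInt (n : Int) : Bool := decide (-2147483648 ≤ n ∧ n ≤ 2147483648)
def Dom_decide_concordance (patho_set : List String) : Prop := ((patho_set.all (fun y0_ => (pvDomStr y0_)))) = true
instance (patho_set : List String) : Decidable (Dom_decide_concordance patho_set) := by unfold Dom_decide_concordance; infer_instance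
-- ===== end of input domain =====

-- B replaces A's O(n^2) pairwise pop-and-compare loop by one counting pass: concordant iff the
-- number of terms containing "PATHO" (case-insensitively) is 0 or n.  Return-value claim only; A does not mutate its argument.

-- ===== PORT A =====
def isDiscordant (term1 term2 : String) : Bool :=
  if PySem.Chars.isIn "PATHO".toList
      (PySem.Chars.upper term1.toList ++ PySem.Chars.upper term2.toList) then
    if PySem.Chars.isIn "PATHO".toList (PySem.Chars.upper term1.toList)
        && PySem.Chars.isIn "PATHO".toList (PySem.Chars.upper term2.toList) then
      false
    else
      true
  else
    false

-- the while-loop: pop the first item, compare it with every remaining item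
def loopA : List String → Bool → Bool
  | [], concordant => concordant
  | first_item :: rest, concordant =>
      loopA rest (rest.foldl (fun c y => if isDiscordant first_item y then false else c) concordant)

def decide_concordance (patho_set : List String) : Bool :=
  if patho_set.length == 1 then true
  else loopA patho_set true

-- ===== PORT B =====
def hasPatho (t : String) : Bool :=
  PySem.Chars.isIn "PATHO".toList (PySem.Chars.upper t.toList)

def decide_concordance_alt (patho_set : List String) : Bool :=
  let n_patho : Int := patho_set.foldl (fun acc t => if hasPatho t then acc + 1 else acc) 0
  n_patho == 0 || n_patho == (patho_set.length : Int)

-- ===== PRECONDITION & SPEC =====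
-- helpers for Pre_ (independent of the ports): a term containing "PATHO", and an
-- "accidental" pair: neither term contains "PATHO" but their concatenated uppercase forms do
def dHasPatho (t : String) : Bool :=
  PySem.Str.isIn "PATHO" (PySem.Str.upper t)

def spanPair (t1 t2 : String) : Bool :=
  PySem.Chars.isIn "PATHO".toList
    ((PySem.Str.upper t1).toList ++ (PySem.Str.upper t2).toList)

def badPair (t1 t2 : String) : Bool :=
  !dHasPatho t1 && !dHasPatho t2 && (spanPair t1 t2 || spanPair t2 t1)

def hasBadPair : List String → Bool
  | [] => false
  | x :: r => r.any (badPair x) || hasBadPair r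

-- Pre_ excludes inputs on which A still returns: lists containing a pair of terms neither of
-- which contains "PATHO" but whose concatenation does ("PATHO" spanning the boundary, e.g.
-- ["HOPAT", "hopat"]); there A's verdict is an accident of string concatenation and, the
-- argument being a Python set, of its iteration order.
def Pre_decide_concordance (patho_set : List String) : Prop :=
  hasBadPair patho_set = false

instance (patho_set : List String) : Decidable (Pre_decide_concordance patho_set) := by
  unfold Pre_decide_concordance; infer_instance

def pvWitness_decide_concordance : List String := (["Pathogenic", "benign", "Likely pathogenic"])

def Spec_decide_concordance (patho_set : List String) (out : Bool) : Prop :=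
  out = decide_concordance_alt patho_set

instance (patho_set : List String) (out : Bool) : Decidable (Spec_decide_concordance patho_set out) := by
  unfold Spec_decide_concordance; infer_instance

-- ===== CLAIM (what is proved, stated in full; the proofs are below) =====
def Claim_equal_decide_concordance : Prop := ∀ (patho_set : List String), Dom_decide_concordance patho_set → Pre_decide_concordance patho_set → Spec_decide_concordance patho_set (decide_concordance patho_set)

-- ===== LEMMAS AND PROOFS =====

def cPair (t1 t2 : String) : Bool :=
  PySem.Chars.isIn "PATHO".toList
    (PySem.Chars.upper t1.toList ++ PySem.Chars.upper t2.toList)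

lemma dHasPatho_eq (t : String) : dHasPatho t = hasPatho t := by
  simp [dHasPatho, hasPatho, PySem.Str.isIn_eq]

lemma spanPair_eq (t1 t2 : String) : spanPair t1 t2 = cPair t1 t2 := by
  simp [spanPair, cPair]

lemma span_of_left {t1 t2 : String} (h : hasPatho t1 = true) : cPair t1 t2 = true := by
  rw [cPair, PySem.Chars.isIn_iff_infix]
  rw [hasPatho, PySem.Chars.isIn_iff_infix] at h
  obtain ⟨s, t, hst⟩ := h
  exact ⟨s, t ++ PySem.Chars.upper t2.toList, by rw [← hst]; simp⟩

lemma span_of_right {t1 t2 : String} (h : hasPatho t2 = true) : cPair t1 t2 = true := by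
  rw [cPair, PySem.Chars.isIn_iff_infix]
  rw [hasPatho, PySem.Chars.isIn_iff_infix] at h
  obtain ⟨s, t, hst⟩ := h
  exact ⟨PySem.Chars.upper t1.toList ++ s, t, by rw [← hst]; simp⟩

lemma isDiscordant_def (x y : String) :
    isDiscordant x y
      = (if cPair x y then (if hasPatho x && hasPatho y then false else true) else false) := rfl

lemma isDiscordant_eq (x y : String) :
    isDiscordant x y
      = ((hasPatho x != hasPatho y) || (!hasPatho x && !hasPatho y && cPair x y)) := by
  rw [isDiscordant_def]
  cases hx : hasPatho x <;> cases hy : hasPatho y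
  · cases hs : cPair x y <;> simp [*]
  · simp [span_of_right (t1 := x) hy]
  · simp [span_of_left (t2 := y) hx]
  · simp [span_of_left (t2 := y) hx]

def anyDisc : List String → Bool
  | [] => false
  | x :: r => r.any (isDiscordant x) || anyDisc r

lemma loopA_eq (l : List String) : ∀ c, loopA l c = (c && !anyDisc l) := by
  induction l with
  | nil => intro c; simp [loopA, anyDisc]
  | cons x r ih =>
      intro c
      rw [loopA, PySem.List.foldl_if_false_eq, ih, anyDisc]
      cases c <;> cases r.any (isDiscordant x) <;> cases anyDisc r <;> rfl

lemma countB (l : List String) :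
    decide_concordance_alt l
      = (decide (l.countP hasPatho = 0) || decide (l.countP hasPatho = l.length)) := by
  rw [decide_concordance_alt]
  have h := PySem.List.foldl_if_add_one hasPatho l 0
  simp only [h]
  have hc : (l.countP hasPatho : Int) = 0 ↔ l.countP hasPatho = 0 := by exact_mod_cast Iff.rfl
  have hl : (l.countP hasPatho : Int) = (l.length : Int) ↔ l.countP hasPatho = l.length := by
    exact_mod_cast Iff.rfl
  by_cases h0 : l.countP hasPatho = 0 <;> by_cases h1 : l.countP hasPatho = l.length
  · simp [h0, h1]
  · simp [h0, h1, hc]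
  · simp [h0, h1, hl]
  · simp [h0, h1, hc, hl]

-- if both a PATHO term and a non-PATHO term occur, A's pair scan finds a discordant pair
lemma anyDisc_of_mixed {l : List String} (ha : ∃ a ∈ l, hasPatho a = true)
    (hb : ∃ b ∈ l, hasPatho b = false) : anyDisc l = true := by
  induction l with
  | nil => obtain ⟨a, ha', _⟩ := ha; exact absurd ha' (List.not_mem_nil)
  | cons x r ih =>
      rw [anyDisc, Bool.or_eq_true]
      by_cases hmix : ∃ y ∈ r, hasPatho y ≠ hasPatho x
      · left
        obtain ⟨y, hy, hne⟩ := hmix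
        refine List.any_eq_true.mpr ⟨y, hy, ?_⟩
        rw [isDiscordant_eq]
        cases h1 : hasPatho x <;> cases h2 : hasPatho y <;> simp_all
      · push Not at hmix
        obtain ⟨a, ha', hap⟩ := ha
        obtain ⟨b, hb', hbp⟩ := hb
        have hva : hasPatho a = hasPatho x := by
          rcases List.mem_cons.mp ha' with h | h
          · rw [h]
          · exact hmix a h
        have hvb : hasPatho b = hasPatho x := by
          rcases List.mem_cons.mp hb' with h | h
          · rw [h]
          · exact hmix b h
        rw [hap] at hva; rw [hbp] at hvb; rw [← hva] at hvb; exact absurd hvb (by simp)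

-- all terms non-PATHO and no accidental pair ⇒ no discordant pair
lemma anyDisc_false {l : List String} (hall : ∀ s ∈ l, hasPatho s = false)
    (hbad : hasBadPair l = false) : anyDisc l = false := by
  induction l with
  | nil => rfl
  | cons x r ih =>
      rw [hasBadPair, Bool.or_eq_false_iff] at hbad
      rw [anyDisc, Bool.or_eq_false_iff]
      constructor
      · rw [List.any_eq_false]
        intro y hy
        rw [isDiscordant_eq, hall x (by simp), hall y (by simp [hy])]
        have hb : badPair x y = false := by
          have := hbad.1; rw [List.any_eq_false] at this
          exact Bool.eq_false_iff.mpr (this y hy)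
        rw [badPair, dHasPatho_eq, dHasPatho_eq, hall x (by simp), hall y (by simp [hy])] at hb
        simp only [spanPair_eq] at hb
        simp at hb
        simp [hb.1]
      · exact ih (fun s hs => hall s (by simp [hs])) hbad.2

-- all terms contain PATHO: every pair is concordant
lemma anyDisc_false_of_allT {l : List String} (hallT : ∀ s ∈ l, hasPatho s = true) :
    anyDisc l = false := by
  induction l with
  | nil => rfl
  | cons x r ih =>
      rw [anyDisc, Bool.or_eq_false_iff]
      refine ⟨List.any_eq_false.mpr fun y hy => ?_, ih fun s hs => hallT s (by simp [hs])⟩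
      rw [isDiscordant_eq, hallT x (by simp), hallT y (by simp [hy])]
      simp

-- either some "discordant" pair is a genuinely mixed pair, or the input has an accidental pair
lemma anyDisc_cases {l : List String} (h : anyDisc l = true) :
    ((∃ a ∈ l, hasPatho a = true) ∧ (∃ b ∈ l, hasPatho b = false))
      ∨ ((∀ s ∈ l, hasPatho s = false) ∧ hasBadPair l = true) := by
  by_cases hall : ∀ s ∈ l, hasPatho s = false
  · by_cases hbad : hasBadPair l = true
    · exact Or.inr ⟨hall, hbad⟩
    · exact absurd h (by simp [anyDisc_false hall (Bool.eq_false_iff.mpr hbad)])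
  · push Not at hall
    obtain ⟨a, ha, hap⟩ := hall
    have hap : hasPatho a = true := by cases hv : hasPatho a; exact absurd hv hap; rfl
    by_cases hex : ∃ b ∈ l, hasPatho b = false
    · exact Or.inl ⟨⟨a, ha, hap⟩, hex⟩
    · push Not at hex
      have hallT : ∀ s ∈ l, hasPatho s = true := by
        intro s hs; cases hv : hasPatho s
        · exact absurd hv (hex s hs)
        · rfl
      exact absurd h (by simp [anyDisc_false_of_allT hallT])

lemma countP_pos_of_mem {l : List String} {a : String} (ha : a ∈ l) (hp : hasPatho a = true) :
    0 < l.countP hasPatho :=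
  List.countP_pos_iff.mpr ⟨a, ha, hp⟩

lemma countP_lt_of_mem {l : List String} {b : String} (hb : b ∈ l) (hp : hasPatho b = false) :
    l.countP hasPatho < l.length := by
  by_contra h
  have := List.countP_le_length (p := hasPatho) (l := l)
  have heq : l.countP hasPatho = l.length := by omega
  have := (List.countP_eq_length).mp heq b hb
  simp [hp] at this

-- ===== VERDICT (by name: the statement is the Claim_ definition above) =====
theorem decide_concordance_spec : Claim_equal_decide_concordance := by
  intro l _ hP
  rw [Pre_decide_concordance] at hP
  rw [Spec_decide_concordance, countB, decide_concordance]
  by_cases h1 : l.length = 1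
  · obtain ⟨x, hx⟩ := List.length_eq_one_iff.mp h1
    subst hx
    cases hv : hasPatho x <;> simp [hv]
  · rw [if_neg (by simpa using h1), loopA_eq, Bool.true_and]
    cases hA : anyDisc l
    · have hnm : ¬ ((∃ a ∈ l, hasPatho a = true) ∧ (∃ b ∈ l, hasPatho b = false)) := by
        rintro ⟨ha, hb⟩
        exact absurd (anyDisc_of_mixed ha hb) (by simp [hA])
      by_cases h0 : ∀ s ∈ l, hasPatho s = false
      · have : l.countP hasPatho = 0 := List.countP_eq_zero.mpr (by intro s hs; simp [h0 s hs])
        simp [this]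
      · push Not at h0
        obtain ⟨a, ha, hap⟩ := h0
        have hap : hasPatho a = true := by cases hv : hasPatho a; exact absurd hv hap; rfl
        have hallT : ∀ s ∈ l, hasPatho s = true := by
          intro s hs
          cases hv : hasPatho s
          · exact absurd ⟨⟨a, ha, hap⟩, ⟨s, hs, hv⟩⟩ hnm
          · rfl
        have : l.countP hasPatho = l.length := List.countP_eq_length.mpr hallT
        simp [this]
    · rcases anyDisc_cases hA with ⟨⟨a, ha, hap⟩, ⟨b, hb, hbp⟩⟩ | hbad
      · have h0 := countP_pos_of_mem ha hap
        have hl := countP_lt_of_mem hb hbp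
        have e0 : decide (l.countP hasPatho = 0) = false := by
          rw [decide_eq_false_iff_not]; omega
        have e1 : decide (l.countP hasPatho = l.length) = false := by
          rw [decide_eq_false_iff_not]; omega
        rw [e0, e1]; rfl
      · exact absurd hbad.2 (by simp [hP])
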